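-- pv_equiv track=rewrite | github.com/joannefan/about | resume_checker/parse_latest_latex.py | extract_curly_braces_content
-- ===== SOURCE A (Python) =====
-- def extract_curly_braces_content(text):
--     stack = []  # Stack to keep track of opening braces
--     contents = []  # List to store content extracted from lowest-level curly braces
--
--     i = 0
--     while i < len(text):
--         if text[i] == "{" and (i == 0 or text[i - 1] != "\\"):
--             # Start of a new curly brace section
--             if stack:
--                 # If there's already an open brace, this is a nested brace
--                 # Mark the parent level as having nested braces
--                 stack[-1][1] = False
--             # Push index and flag indicating it's a valid (non-nested) section
--             stack.append([i, True])
--         elif text[i] == "}" and (i == 0 or text[i - 1] != "\\"):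
--             # End of a curly brace section
--             if stack:
--                 start, is_lowest = stack.pop()
--                 if is_lowest:
--                     # Extract content between the braces
--                     content = text[start + 1 : i]
--                     # Add to list only if it's a lowest-level section
--                     contents.append(content)
--         i += 1
--
--     return contents
-- ===== SOURCE B (Python) =====
-- def extract_curly_braces_content(text):
--     contents = []
--     depth = 0          # number of currently open unescaped braces
--     start = 0          # index of the most recent unescaped '{'
--     just_opened = False  # True iff the last brace event was an opening '{'
--     for i, ch in enumerate(text):
--         escaped = i > 0 and text[i - 1] == "\\"
--         if ch == "{" and not escaped:
--             depth += 1
--             start = i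
--             just_opened = True
--         elif ch == "}" and not escaped:
--             if depth > 0:
--                 if just_opened:
--                     contents.append(text[start + 1 : i])
--                 depth -= 1
--             just_opened = False
--     return contents
-- ===== Notes on version B (the rewrite author's own statement) =====
-- stated objective: simpler
-- what changed: Replaces A's explicit stack of mutable [index, flag] pairs by three O(1) scalars (depth, start index of the last unescaped '{', and a just_opened flag) in the same single left-to-right scan.
import Mathlib
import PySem

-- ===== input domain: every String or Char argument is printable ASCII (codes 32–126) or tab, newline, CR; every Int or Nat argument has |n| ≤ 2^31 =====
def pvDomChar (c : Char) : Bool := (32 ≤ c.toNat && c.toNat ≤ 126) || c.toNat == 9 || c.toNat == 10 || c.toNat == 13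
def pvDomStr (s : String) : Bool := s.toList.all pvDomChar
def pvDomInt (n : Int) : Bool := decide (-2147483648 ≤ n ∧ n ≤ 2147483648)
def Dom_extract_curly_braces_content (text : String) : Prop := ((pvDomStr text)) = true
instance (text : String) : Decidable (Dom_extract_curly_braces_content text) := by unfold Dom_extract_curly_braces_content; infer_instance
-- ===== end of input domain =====

-- B drops A's explicit stack of [index, flag] pairs for three scalars (depth, start, just_opened)
-- in the same single scan: simpler, O(1) auxiliary state instead of O(n).

-- ===== PORT A =====
-- A's loop body: stack with its top at the head (push = cons, stack[-1] = head, pop = uncons);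
-- contents accumulated at the back, as Python's append does.
def pvAStep (cs : List Char) (st : List (Int × Bool) × List String) (p : Int × Char) :
    List (Int × Bool) × List String :=
  if p.2 = '{' ∧ (p.1 = 0 ∨ PySem.List.pyGet? cs (p.1 - 1) ≠ some '\\') then
    match st.1 with
    | [] => ([(p.1, true)], st.2)
    | (s, _) :: rest => ((p.1, true) :: (s, false) :: rest, st.2)
  else if p.2 = '}' ∧ (p.1 = 0 ∨ PySem.List.pyGet? cs (p.1 - 1) ≠ some '\\') then
    match st.1 with
    | [] => st
    | (start, isLowest) :: rest =>
      (rest,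
        if isLowest then
          st.2 ++ [String.ofList (PySem.List.slice cs (some (start + 1)) (some p.1))]
        else st.2)
  else st

def extract_curly_braces_content (text : String) : List String :=
  ((PySem.List.enumerate text.toList 0).foldl (pvAStep text.toList) ([], [])).2

-- ===== PORT B =====
-- B's loop body over the state (depth, start, just_opened, contents).
def pvBStep (cs : List Char) (st : Int × Int × Bool × List String) (p : Int × Char) :
    Int × Int × Bool × List String :=
  if p.2 = '{' ∧ ¬ (0 < p.1 ∧ PySem.List.pyGet? cs (p.1 - 1) = some '\\') then
    (st.1 + 1, p.1, true, st.2.2.2)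
  else if p.2 = '}' ∧ ¬ (0 < p.1 ∧ PySem.List.pyGet? cs (p.1 - 1) = some '\\') then
    if st.1 > 0 then
      (st.1 - 1, st.2.1, false,
        if st.2.2.1 then
          st.2.2.2 ++ [String.ofList (PySem.List.slice cs (some (st.2.1 + 1)) (some p.1))]
        else st.2.2.2)
    else (st.1, st.2.1, false, st.2.2.2)
  else st

def extract_curly_braces_content_alt (text : String) : List String :=
  ((PySem.List.enumerate text.toList 0).foldl (pvBStep text.toList) (0, 0, false, [])).2.2.2

-- ===== PRECONDITION & SPEC =====
def Spec_extract_curly_braces_content (text : String) (out : List String) : Prop := out = extract_curly_braces_content_alt text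
instance (text : String) (out : List String) : Decidable (Spec_extract_curly_braces_content text out) := by unfold Spec_extract_curly_braces_content; infer_instance

-- ===== CLAIM (what is proved, stated in full; the proofs are below) =====
def Claim_equal_extract_curly_braces_content : Prop := ∀ (text : String), Dom_extract_curly_braces_content text → Spec_extract_curly_braces_content text (extract_curly_braces_content text)

-- ===== LEMMAS AND PROOFS =====

-- Coupling invariant between A's state and B's state:
-- same contents; depth = stack height; every non-top stack entry is already marked non-lowest;
-- the top entry's flag is B's just_opened, and when set, its index is B's start.
def pvInvAB (sA : List (Int × Bool) × List String) (sB : Int × Int × Bool × List String) : Prop :=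
  sA.2 = sB.2.2.2 ∧ (sA.1.length : Int) = sB.1 ∧ (∀ e ∈ sA.1.tail, e.2 = false) ∧
  (match sA.1 with
   | [] => sB.2.2.1 = false
   | (s, f) :: _ => f = sB.2.2.1 ∧ (f = true → s = sB.2.1))

theorem pvStep_inv (cs : List Char) (p : Int × Char) (hp : 0 ≤ p.1)
    (sA : List (Int × Bool) × List String) (sB : Int × Int × Bool × List String)
    (h : pvInvAB sA sB) : pvInvAB (pvAStep cs sA p) (pvBStep cs sB p) := by
  obtain ⟨h1, h2, h3, h4⟩ := h
  have hesc : (p.1 = 0 ∨ PySem.List.pyGet? cs (p.1 - 1) ≠ some '\\') ↔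
      ¬ (0 < p.1 ∧ PySem.List.pyGet? cs (p.1 - 1) = some '\\') := by
    constructor
    · rintro (h0 | hne) ⟨hpos, heq⟩
      · omega
      · exact hne heq
    · intro hn
      by_cases h0 : p.1 = 0
      · exact Or.inl h0
      · exact Or.inr (fun heq => hn ⟨by omega, heq⟩)
  unfold pvAStep pvBStep
  by_cases hob : p.2 = '{' ∧ (p.1 = 0 ∨ PySem.List.pyGet? cs (p.1 - 1) ≠ some '\\')
  · have hobB : p.2 = '{' ∧ ¬ (0 < p.1 ∧ PySem.List.pyGet? cs (p.1 - 1) = some '\\') :=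
      ⟨hob.1, hesc.mp hob.2⟩
    rw [if_pos hob, if_pos hobB]
    rcases hA : sA.1 with _ | ⟨⟨s, f⟩, rest⟩
    · refine ⟨h1, ?_, ?_, by simp⟩
      · rw [hA] at h2; simp at h2 ⊢; omega
      · intro e he; simp at he
    · refine ⟨h1, ?_, ?_, by simp⟩
      · rw [hA] at h2; simp only [List.length_cons] at h2 ⊢; omega
      · intro e he
        simp at he
        rcases he with he | he
        · simp [he]
        · exact h3 e (by simp [hA, he])
  · have hobB : ¬ (p.2 = '{' ∧ ¬ (0 < p.1 ∧ PySem.List.pyGet? cs (p.1 - 1) = some '\\')) :=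
      fun hc => hob ⟨hc.1, hesc.mpr hc.2⟩
    rw [if_neg hob, if_neg hobB]
    by_cases hcb : p.2 = '}' ∧ (p.1 = 0 ∨ PySem.List.pyGet? cs (p.1 - 1) ≠ some '\\')
    · have hcbB : p.2 = '}' ∧ ¬ (0 < p.1 ∧ PySem.List.pyGet? cs (p.1 - 1) = some '\\') :=
        ⟨hcb.1, hesc.mp hcb.2⟩
      rw [if_pos hcb, if_pos hcbB]
      rcases hA : sA.1 with _ | ⟨⟨s, f⟩, rest⟩
      · have hd0 : ¬ sB.1 > 0 := by rw [hA] at h2; simp at h2; omega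
        rw [if_neg hd0]
        rw [hA] at h4
        exact ⟨h1, h2, h3, by simp [hA]⟩
      · have hd0 : sB.1 > 0 := by
          rw [hA] at h2; simp only [List.length_cons] at h2; omega
        rw [if_pos hd0]
        rw [hA] at h4
        obtain ⟨hf, hs⟩ := h4
        refine ⟨?_, ?_, ?_, ?_⟩
        · cases f with
          | true => simp [← hf, h1, hs rfl]
          | false => simp [← hf, h1]
        · rw [hA] at h2; simp only [List.length_cons] at h2 ⊢; omega
        · intro e he
          refine h3 e ?_
          rcases rest with _ | ⟨e2, rest2⟩
          · simp at he
          · simp [hA] at he ⊢; tauto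
        · rcases rest with _ | ⟨⟨s2, f2⟩, rest2⟩
          · simp
          · have : f2 = false := h3 (s2, f2) (by simp [hA])
            simp [this]
    · have hcbB : ¬ (p.2 = '}' ∧ ¬ (0 < p.1 ∧ PySem.List.pyGet? cs (p.1 - 1) = some '\\')) :=
        fun hc => hcb ⟨hc.1, hesc.mpr hc.2⟩
      rw [if_neg hcb, if_neg hcbB]
      exact ⟨h1, h2, h3, h4⟩

theorem pvFold_inv (cs : List Char) (l : List Char) (s : Int) (hs : 0 ≤ s)
    (sA : List (Int × Bool) × List String) (sB : Int × Int × Bool × List String)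
    (h : pvInvAB sA sB) :
    pvInvAB ((PySem.List.enumerate l s).foldl (pvAStep cs) sA)
            ((PySem.List.enumerate l s).foldl (pvBStep cs) sB) := by
  induction l generalizing s sA sB with
  | nil => simpa [PySem.List.enumerate_nil] using h
  | cons x xs ih =>
    rw [PySem.List.enumerate_cons]
    simp only [List.foldl_cons]
    exact ih (s + 1) (by omega) _ _ (pvStep_inv cs (s, x) hs sA sB h)

-- ===== VERDICT (by name: the statement is the Claim_ definition above) =====
theorem extract_curly_braces_content_spec : Claim_equal_extract_curly_braces_content := by
  intro text _
  unfold Spec_extract_curly_braces_content extract_curly_braces_content extract_curly_braces_content_alt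
  exact (pvFold_inv text.toList text.toList 0 le_rfl ([], []) (0, 0, false, [])
    ⟨rfl, rfl, by simp, rfl⟩).1
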